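-- pv_equiv track=rewrite | github.com/msftsean/pdf-to-html | app/dependencies.py | _extract_account_key
-- ===== SOURCE A (Python) =====
-- _AZURITE_ACCOUNT_KEY = (
--     "Eby8vdM02xNOcqFlqUwJPLlmEtlCDXJ1OUzFT50uSRZ6IFsuFq2UVErCz4I6tq"
--     "/K1SZFPTOtr/KBHBeksoGMGw=="
-- )
--
-- def _is_azurite(connection_string: str) -> bool:
--     """Return ``True`` when the connection string targets the Azurite emulator."""
--     return (
--         "UseDevelopmentStorage=true" in connection_string
--         or "127.0.0.1:10000" in connection_string
--     )
--
-- def _extract_account_key(connection_string: str) -> str | None: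
--     """Parse ``AccountKey`` from an Azure Storage connection string.
--
--     When the connection string is the Azurite shorthand
--     ``UseDevelopmentStorage=true``, returns the well-known Azurite account key
--     (there is no explicit ``AccountKey`` in that string).
--
--     Returns ``None`` if no account key is available (identity-based auth).
--     """
--     if _is_azurite(connection_string):
--         return _AZURITE_ACCOUNT_KEY
--     for part in connection_string.split(";"):
--         part = part.strip()
--         if part.lower().startswith("accountkey="):
--             return part.split("=", 1)[1]
--     return None
-- ===== SOURCE B (Python) =====
-- _AZURITE_ACCOUNT_KEY = (
--     "Eby8vdM02xNOcqFlqUwJPLlmEtlCDXJ1OUzFT50uSRZ6IFsuFq2UVErCz4I6tq"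
--     "/K1SZFPTOtr/KBHBeksoGMGw=="
-- )
--
-- def _is_azurite(connection_string: str) -> bool:
--     return (
--         "UseDevelopmentStorage=true" in connection_string
--         or "127.0.0.1:10000" in connection_string
--     )
--
-- def _extract_account_key(connection_string: str) -> str | None:
--     # Single pass over the raw string: jump from anchor to anchor (start of
--     # string / just after each ';') with find, instead of building split parts.
--     if _is_azurite(connection_string):
--         return _AZURITE_ACCOUNT_KEY
--     low = connection_string.lower()
--     n = len(connection_string)
--     i = 0  # current anchor: segment start
--     while True:
--         j = i
--         while j < n and connection_string[j].isspace():
--             j += 1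
--         if low.startswith("accountkey=", j):
--             end = low.find(";", j + 11)
--             if end == -1:
--                 end = n
--             return connection_string[j + 11:end].rstrip()
--         i = low.find(";", i)
--         if i == -1:
--             return None
--         i += 1
-- ===== Notes on version B (the rewrite author's own statement) =====
-- stated objective: alternative
-- what changed: Replaces A's split-into-parts-then-loop (strip, lowercased startswith, and a bounded split per part) by a single anchor-jumping scan over the raw string: from each segment start it skips whitespace, tests a lowercased startswith at that index, and captures up to the next separator via find, never materialising the list of parts.
import Mathlib
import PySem

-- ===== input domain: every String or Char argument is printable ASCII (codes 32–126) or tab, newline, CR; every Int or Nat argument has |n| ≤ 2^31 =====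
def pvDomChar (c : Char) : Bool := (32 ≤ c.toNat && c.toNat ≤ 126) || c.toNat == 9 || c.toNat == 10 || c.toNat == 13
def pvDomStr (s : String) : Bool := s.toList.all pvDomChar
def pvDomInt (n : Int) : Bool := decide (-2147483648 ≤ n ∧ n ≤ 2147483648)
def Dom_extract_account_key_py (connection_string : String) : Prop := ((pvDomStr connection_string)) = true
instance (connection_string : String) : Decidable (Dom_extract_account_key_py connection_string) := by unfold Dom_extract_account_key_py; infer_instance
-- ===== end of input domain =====

set_option maxRecDepth 4096


-- B replaces the split-into-parts-then-loop of A by a single anchor-jumping scan over the raw string (alternative decomposition, same cost).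

-- ===== PORT A =====
def pvAzuriteKey : String :=
  "Eby8vdM02xNOcqFlqUwJPLlmEtlCDXJ1OUzFT50uSRZ6IFsuFq2UVErCz4I6tq/K1SZFPTOtr/KBHBeksoGMGw=="

-- the for-loop of A over connection_string.split(";"); part.split("=",1)[1] is
-- splitOnMax … [ '=' ] 1 indexed with pyGet? (none = IndexError, unreachable as the
-- startswith guard guarantees an '=')
def akLoopA : List (List Char) → Option (List Char)
  | [] => none
  | p :: ps =>
    let part := PySem.Chars.strip p
    if PySem.Chars.startswith (PySem.Chars.lower part) "accountkey=".toList then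
      PySem.List.pyGet? (PySem.Chars.splitOnMax part ['='] 1) 1
    else akLoopA ps

def extract_account_key_py (connection_string : String) : Option String :=
  if PySem.Str.isIn "UseDevelopmentStorage=true" connection_string
      || PySem.Str.isIn "127.0.0.1:10000" connection_string then
    some pvAzuriteKey
  else
    (akLoopA (PySem.Chars.splitOn connection_string.toList [';'])).map String.ofList

-- ===== PORT B =====
-- Source B's while-loop: s is the suffix at the current anchor (start of string or just
-- after a ';'); skip whitespace, test lowercased startswith there, capture up to the
-- next ';' (find), else jump past the next ';' (low.find(';', i) + 1).
def akScanB (s : List Char) : Option (List Char) :=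
  let t := s.dropWhile PySem.Chars.isspace
  if PySem.Chars.startswith (PySem.Chars.lower t) "accountkey=".toList then
    some (PySem.Chars.rstrip ((t.drop 11).takeWhile (· ≠ ';')))
  else
    match h : s.dropWhile (· ≠ ';') with
    | [] => none
    | _ :: b => akScanB b
termination_by s.length
decreasing_by
  have h1 : (s.dropWhile (· ≠ ';')).length ≤ s.length := List.length_dropWhile_le _ _
  rw [h] at h1
  simp only [List.length_cons] at h1
  omega

def extract_account_key_py_alt (connection_string : String) : Option String :=
  if PySem.Str.isIn "UseDevelopmentStorage=true" connection_string
      || PySem.Str.isIn "127.0.0.1:10000" connection_string then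
    some pvAzuriteKey
  else
    (akScanB connection_string.toList).map String.ofList

-- ===== PRECONDITION & SPEC =====
def Spec_extract_account_key_py (connection_string : String) (out : Option String) : Prop := out = extract_account_key_py_alt connection_string
instance (connection_string : String) (out : Option String) : Decidable (Spec_extract_account_key_py connection_string out) := by unfold Spec_extract_account_key_py; infer_instance

-- ===== CLAIM (what is proved, stated in full; the proofs are below) =====
def Claim_equal_extract_account_key_py : Prop := ∀ (connection_string : String), Dom_extract_account_key_py connection_string → Spec_extract_account_key_py connection_string (extract_account_key_py connection_string)

-- ===== LEMMAS AND PROOFS =====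

-- reference splitter: Python s.split(";") as structural recursion
def pvSSplit : List Char → List (List Char)
  | [] => [[]]
  | c :: r =>
    if c = ';' then [] :: pvSSplit r
    else
      match pvSSplit r with
      | h :: t => (c :: h) :: t
      | [] => [[c]]

theorem pvSSplit_ne_nil (l : List Char) : pvSSplit l ≠ [] := by
  cases l with
  | nil => simp [pvSSplit]
  | cons c r =>
    simp only [pvSSplit]
    split
    · simp
    · split <;> simp

theorem pv_go_eq (fuel : ℕ) : ∀ (l cur : List Char) (acc : List (List Char)), l.length ≤ fuel →
    PySem.Chars.splitOn.go [';'] fuel l cur acc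
      = acc.reverse ++ (pvSSplit l).modifyHead (cur.reverse ++ ·) := by
  induction fuel with
  | zero =>
    intro l cur acc h
    have : l = [] := by cases l <;> simp_all
    subst this
    simp [PySem.Chars.splitOn.go, pvSSplit]
  | succ f ih =>
    intro l cur acc h
    cases l with
    | nil => simp [PySem.Chars.splitOn.go, pvSSplit]
    | cons c rest =>
      rw [PySem.Chars.splitOn.go]
      by_cases hc : c = ';'
      · subst hc
        have hpre : List.isPrefixOf [';'] (';' :: rest) = true := by simp [List.isPrefixOf]
        rw [if_pos hpre]
        simp only [List.length_cons, List.drop_succ_cons, List.drop_zero, List.length_nil]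
        rw [ih rest [] (List.reverse cur :: acc) (by simpa using h)]
        simp only [pvSSplit, if_pos rfl, List.modifyHead_cons, List.reverse_cons, List.append_nil, List.nil_append]
        cases pvSSplit rest <;> simp [List.modifyHead]
      · have hpre : List.isPrefixOf [';'] (c :: rest) = false := by
          simp [List.isPrefixOf]
          exact fun he => hc he.symm
        rw [if_neg (by simp [hpre])]
        rw [ih rest (c :: cur) acc (by simpa using h)]
        simp only [pvSSplit, if_neg hc]
        rcases hsp : pvSSplit rest with _ | ⟨hh, tt⟩
        · exact absurd hsp (pvSSplit_ne_nil rest)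
        · simp [List.modifyHead]

theorem pv_splitOn_eq (l : List Char) : PySem.Chars.splitOn l [';'] = pvSSplit l := by
  rw [PySem.Chars.splitOn, pv_go_eq _ _ _ _ (by omega)]
  rcases h : pvSSplit l with _ | ⟨hh, tt⟩
  · exact absurd h (pvSSplit_ne_nil l)
  · simp [List.modifyHead]

theorem pv_goMax0 (fuel : ℕ) (l cur : List Char) (acc : List (List Char)) :
    PySem.Chars.splitOnMax.go ['='] fuel 0 l cur acc = acc.reverse ++ [cur.reverse ++ l] := by
  cases fuel with
  | zero => simp [PySem.Chars.splitOnMax.go]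
  | succ f => cases l with
    | nil => simp [PySem.Chars.splitOnMax.go]
    | cons c r => rw [PySem.Chars.splitOnMax.go]; simp

theorem pv_goMax1 (fuel : ℕ) : ∀ (l cur : List Char) (acc : List (List Char)), l.length ≤ fuel →
    PySem.Chars.splitOnMax.go ['='] fuel 1 l cur acc
      = acc.reverse ++ (if '=' ∈ l then [cur.reverse ++ l.takeWhile (· ≠ '='), (l.dropWhile (· ≠ '=')).tail]
          else [cur.reverse ++ l]) := by
  induction fuel with
  | zero =>
    intro l cur acc h
    have : l = [] := by cases l <;> simp_all
    subst this
    simp [PySem.Chars.splitOnMax.go]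
  | succ f ih =>
    intro l cur acc h
    cases l with
    | nil => simp [PySem.Chars.splitOnMax.go]
    | cons c rest =>
      rw [PySem.Chars.splitOnMax.go]
      rw [if_neg (by omega)]
      by_cases hc : c = '='
      · subst hc
        rw [if_pos (by simp [List.isPrefixOf])]
        simp only [List.length_cons, List.drop_succ_cons, List.drop_zero]
        rw [pv_goMax0]
        simp [List.takeWhile, List.dropWhile]
      · rw [if_neg (by simp [List.isPrefixOf]; exact fun he => hc he.symm)]
        rw [ih rest (c :: cur) acc (by simpa using h)]
        have hc' : ¬ ('=' = c) := fun he => hc he.symm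
        by_cases hm : '=' ∈ rest
        · simp [hm, hc, hc', List.takeWhile_cons, List.dropWhile_cons]
        · simp [hm, hc, hc']

theorem pv_splitOnMax1 (l : List Char) :
    PySem.Chars.splitOnMax l ['='] 1
      = if '=' ∈ l then [l.takeWhile (· ≠ '='), (l.dropWhile (· ≠ '=')).tail] else [l] := by
  rw [PySem.Chars.splitOnMax, if_neg (by omega)]
  rw [(by norm_num : (1:ℤ).toNat = 1), pv_goMax1 _ _ _ _ (by omega)]
  simp

-- character facts
theorem pv_lowerChar_cases (c : Char) :
    PySem.Chars.lowerChar c = c ∨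
      (65 ≤ c.toNat ∧ c.toNat ≤ 90 ∧ (PySem.Chars.lowerChar c).toNat = c.toNat + 32) := by
  unfold PySem.Chars.lowerChar PySem.Chars.isupper
  by_cases h : (decide ('A' ≤ c) && decide (c ≤ 'Z')) = true
  · right
    simp only [Bool.and_eq_true, decide_eq_true_eq] at h
    obtain ⟨h1, h2⟩ := h
    have h1' : 65 ≤ c.toNat := h1
    have h2' : c.toNat ≤ 90 := h2
    refine ⟨h1', h2', ?_⟩
    rw [if_pos (by simp [h1, h2])]
    rw [Char.toNat_ofNat, if_pos (by left; omega)]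
  · left
    rw [if_neg h]

theorem pv_key_src (c k : Char) (h : PySem.Chars.lowerChar c = k)
    (hk : k ∈ "accountkey=".toList) :
    PySem.Chars.isspace c = false ∧ c ≠ ';' ∧ (c = '=' ↔ k = '=') := by
  rcases pv_lowerChar_cases c with hid | ⟨h1, h2, h3⟩
  · rw [hid] at h
    subst h
    simp only [show "accountkey=".toList
        = ['a','c','c','o','u','n','t','k','e','y','='] from rfl, List.mem_cons,
      List.mem_singleton, List.not_mem_nil, or_false] at hk
    rcases hk with rfl|rfl|rfl|rfl|rfl|rfl|rfl|rfl|rfl|rfl|rfl <;> exact ⟨by decide, by decide, by decide⟩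
  · rw [h] at h3
    have hc : c ≠ ';' := fun he => by rw [he] at h1; simp at h1
    have hce : c ≠ '=' := fun he => by rw [he] at h1; simp at h1
    have hke : k ≠ '=' := fun he => by rw [he] at h3; simp at h3; omega
    refine ⟨?_, hc, by simp [hce, hke]⟩
    simp only [PySem.Chars.isspace]
    simp only [Bool.or_eq_false_iff, Bool.and_eq_false_iff, decide_eq_false_iff_not]
    omega

theorem pv_lower_semi (c : Char) : PySem.Chars.lowerChar c = ';' ↔ c = ';' := by
  rcases pv_lowerChar_cases c with hid | ⟨h1, h2, h3⟩
  · rw [hid]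
  · constructor
    · intro he; rw [he] at h3; simp at h3; omega
    · intro he; rw [he] at h1; simp at h1

theorem pv_ws_ne_semi (c : Char) (h : PySem.Chars.isspace c = true) : c ≠ ';' := by
  intro he
  rw [he] at h
  simp [PySem.Chars.isspace] at h

-- S1: lstrip commutes with cutting at the first ';'
theorem pv_lstrip_takeWhile (l : List Char) :
    PySem.Chars.lstrip (l.takeWhile (· ≠ ';')) = (PySem.Chars.lstrip l).takeWhile (· ≠ ';') := by
  induction l with
  | nil => simp [PySem.Chars.lstrip]
  | cons c r ih =>
    by_cases hws : PySem.Chars.isspace c = true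
    · have hc : c ≠ ';' := pv_ws_ne_semi c hws
      simp only [PySem.Chars.lstrip, List.takeWhile_cons, List.dropWhile_cons, hws, hc,
        decide_not, if_true, decide_true, Bool.not_false, decide_false] at ih ⊢
      simpa [hc, hws] using ih
    · have hws' : PySem.Chars.isspace c = false := by simpa using hws
      by_cases hc : c = ';'
      · subst hc
        simp [PySem.Chars.lstrip, List.takeWhile_cons, List.dropWhile_cons, hws']
      · simp [PySem.Chars.lstrip, List.takeWhile_cons, List.dropWhile_cons, hws', hc]

-- S2: lower commutes with cutting at the first ';'
theorem pv_lower_takeWhile (l : List Char) :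
    PySem.Chars.lower (l.takeWhile (· ≠ ';')) = (PySem.Chars.lower l).takeWhile (· ≠ ';') := by
  simp only [PySem.Chars.lower, List.takeWhile_map]
  congr 1
  have hfun : ((fun x => decide (x ≠ ';')) ∘ PySem.Chars.lowerChar)
      = (fun x : Char => decide (x ≠ ';')) :=
    funext fun c => decide_eq_decide.mpr (not_congr (pv_lower_semi c))
  rw [hfun]

-- S3: a ';'-free list is a prefix of `y.takeWhile (· ≠ ';')` iff it is one of `y`
theorem pv_prefix_takeWhile_iff (p y : List Char) (hp : ∀ a ∈ p, a ≠ ';') :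
    p <+: y.takeWhile (· ≠ ';') ↔ p <+: y := by
  induction p generalizing y with
  | nil => simp
  | cons a p' ih =>
    cases y with
    | nil => simp
    | cons b y' =>
      by_cases hb : b = ';'
      · subst hb
        rw [List.takeWhile_cons, if_neg (by simp)]
        constructor
        · intro h
          have := h.length_le
          simp at this
        · intro h
          rcases List.cons_prefix_cons.mp h with ⟨h1, -⟩
          exact absurd h1 (hp a (by simp))
      · rw [List.takeWhile_cons, if_pos (by simp [hb])]
        simp only [List.cons_prefix_cons]
        rw [ih y' (fun x hx => hp x (List.mem_cons_of_mem _ hx))]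

-- S4: rstrip passes over a whitespace-free prefix
theorem pv_rstrip_append (a b : List Char) (h : ∀ c ∈ a, PySem.Chars.isspace c = false) :
    PySem.Chars.rstrip (a ++ b) = a ++ PySem.Chars.rstrip b := by
  simp only [PySem.Chars.rstrip, List.reverse_append, List.dropWhile_append]
  by_cases hb : (List.dropWhile PySem.Chars.isspace b.reverse).isEmpty = true
  · rw [if_pos hb]
    rw [List.isEmpty_iff] at hb
    rw [hb]
    simp only [List.reverse_nil, List.append_nil]
    rw [List.dropWhile_eq_self_iff.mpr]
    · simp
    · intro hlen
      have hmem : a.reverse[0]'hlen ∈ a := by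
        have := List.getElem_mem hlen
        simpa using this
      simp only [Bool.not_eq_true]
      exact h _ hmem
  · rw [if_neg hb]
    simp

-- S5: rstrip yields a prefix
theorem pv_rstrip_prefix (x : List Char) : PySem.Chars.rstrip x <+: x := by
  have h := List.dropWhile_suffix (l := x.reverse) PySem.Chars.isspace
  have h2 := h.reverse
  simpa [PySem.Chars.rstrip] using h2

-- append helpers for takeWhile/dropWhile over a satisfying prefix
theorem pv_takeWhile_pass {p : Char → Bool} (a b : List Char) (h : ∀ c ∈ a, p c = true) :
    (a ++ b).takeWhile p = a ++ b.takeWhile p := by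
  induction a with
  | nil => simp
  | cons c r ih =>
    simp only [List.cons_append, List.takeWhile_cons, h c (by simp), if_true]
    rw [ih (fun x hx => h x (List.mem_cons_of_mem _ hx))]

theorem pv_dropWhile_pass {p : Char → Bool} (a b : List Char) (h : ∀ c ∈ a, p c = true) :
    (a ++ b).dropWhile p = b.dropWhile p := by
  induction a with
  | nil => simp
  | cons c r ih =>
    simp only [List.cons_append, List.dropWhile_cons, h c (by simp), if_true]
    exact ih (fun x hx => h x (List.mem_cons_of_mem _ hx))

-- the decomposition of a string whose lowercasing starts with "accountkey="
theorem pv_decomp (u : List Char)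
    (h : "accountkey=".toList <+: PySem.Chars.lower u) :
    ∃ a10 w2, u = a10 ++ '=' :: w2 ∧
      List.map PySem.Chars.lowerChar a10 = "accountkey".toList ∧
      (∀ c ∈ a10, PySem.Chars.isspace c = false ∧ c ≠ ';' ∧ c ≠ '=') := by
  obtain ⟨rest, hrest⟩ := h
  have hkey : "accountkey=".toList = "accountkey".toList ++ ['='] := by decide
  rw [hkey] at hrest
  simp only [PySem.Chars.lower] at hrest
  have hsplit : List.map PySem.Chars.lowerChar u = "accountkey".toList ++ ('=' :: rest) := by
    rw [← hrest]; simp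
  obtain ⟨l₁, l₂, hu, h₁, h₂⟩ := List.map_eq_append_iff.mp hsplit
  cases l₂ with
  | nil => simp at h₂
  | cons ce w2 =>
    simp only [List.map_cons, List.cons.injEq] at h₂
    obtain ⟨hce, -⟩ := h₂
    have hce' : ce = '=' := by
      have := pv_key_src ce '=' hce (by decide)
      exact this.2.2.mpr rfl
    refine ⟨l₁, w2, by rw [hu, hce'], h₁, ?_⟩
    intro c hc
    have hmem : PySem.Chars.lowerChar c ∈ "accountkey".toList := by
      rw [← h₁]; exact List.mem_map_of_mem hc
    have hk := pv_key_src c (PySem.Chars.lowerChar c) rfl (by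
      rw [hkey]; exact List.mem_append_left _ hmem)
    refine ⟨hk.1, hk.2.1, fun he => ?_⟩
    have : PySem.Chars.lowerChar c = '=' := by rw [he]; decide
    have h61 : ('=' : Char) ∈ "accountkey".toList := this ▸ hmem
    revert h61; decide

-- the segment-level test of A agrees with the anchor-level test of B
theorem pv_pred_iff (s : List Char) :
    (PySem.Chars.startswith
        (PySem.Chars.lower (PySem.Chars.strip (s.takeWhile (· ≠ ';')))) "accountkey=".toList = true)
      ↔ (PySem.Chars.startswith
        (PySem.Chars.lower (s.dropWhile PySem.Chars.isspace)) "accountkey=".toList = true) := by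
  rw [PySem.Chars.startswith_iff, PySem.Chars.startswith_iff]
  have hstrip : PySem.Chars.strip (s.takeWhile (· ≠ ';'))
      = PySem.Chars.rstrip ((s.dropWhile PySem.Chars.isspace).takeWhile (· ≠ ';')) := by
    rw [PySem.Chars.strip, pv_lstrip_takeWhile]
    rfl
  rw [hstrip]
  constructor
  · intro h
    have hmono : PySem.Chars.lower (PySem.Chars.rstrip ((s.dropWhile PySem.Chars.isspace).takeWhile (· ≠ ';')))
        <+: PySem.Chars.lower ((s.dropWhile PySem.Chars.isspace).takeWhile (· ≠ ';')) :=
      List.IsPrefix.map _ (pv_rstrip_prefix _)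
    have h1 := h.trans hmono
    rw [pv_lower_takeWhile] at h1
    have hkeyfree : ∀ a ∈ "accountkey=".toList, a ≠ ';' := by
      intro a ha
      rw [show "accountkey=".toList = ['a','c','c','o','u','n','t','k','e','y','='] from rfl] at ha
      fin_cases ha <;> decide
    rw [pv_prefix_takeWhile_iff _ _ hkeyfree] at h1
    exact h1
  · intro h
    obtain ⟨a10, w2, hu, hmap, hprops⟩ := pv_decomp _ h
    rw [hu]
    rw [pv_takeWhile_pass _ _ (fun c hc => by simp [(hprops c hc).2.1])]
    rw [List.takeWhile_cons, if_pos (by simp)]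
    rw [pv_rstrip_append _ _ (fun c hc => (hprops c hc).1)]
    rw [show ('=' :: List.takeWhile (· ≠ ';') w2)
        = ['='] ++ List.takeWhile (· ≠ ';') w2 from rfl]
    rw [pv_rstrip_append _ _ (fun c hc => by
      rcases List.mem_singleton.mp hc with rfl; decide)]
    simp only [PySem.Chars.lower, List.map_append, hmap, List.map_cons,
      show PySem.Chars.lowerChar '=' = '=' from by decide]
    refine ⟨List.map PySem.Chars.lowerChar (PySem.Chars.rstrip (List.takeWhile (· ≠ ';') w2)), ?_⟩
    rw [show "accountkey=".toList = "accountkey".toList ++ ['='] from by decide]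
    simp

-- when the test fires, A's part.split("=",1)[1] equals B's capture
theorem pv_val_eq (s : List Char)
    (h : PySem.Chars.startswith
        (PySem.Chars.lower (s.dropWhile PySem.Chars.isspace)) "accountkey=".toList = true) :
    PySem.List.pyGet?
        (PySem.Chars.splitOnMax (PySem.Chars.strip (s.takeWhile (· ≠ ';'))) ['='] 1) 1
      = some (PySem.Chars.rstrip
          (((s.dropWhile PySem.Chars.isspace).drop 11).takeWhile (· ≠ ';'))) := by
  rw [PySem.Chars.startswith_iff] at h
  obtain ⟨a10, w2, hu, hmap, hprops⟩ := pv_decomp _ h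
  have hlen : a10.length = 10 := by
    have := congrArg List.length hmap
    simpa using this
  have hstrip : PySem.Chars.strip (s.takeWhile (· ≠ ';'))
      = a10 ++ '=' :: PySem.Chars.rstrip (w2.takeWhile (· ≠ ';')) := by
    rw [PySem.Chars.strip, pv_lstrip_takeWhile]
    show PySem.Chars.rstrip ((s.dropWhile PySem.Chars.isspace).takeWhile (· ≠ ';')) = _
    rw [hu]
    rw [pv_takeWhile_pass _ _ (fun c hc => by simp [(hprops c hc).2.1])]
    rw [List.takeWhile_cons, if_pos (by simp)]
    rw [pv_rstrip_append _ _ (fun c hc => (hprops c hc).1)]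
    rw [show ('=' :: List.takeWhile (· ≠ ';') w2)
        = ['='] ++ List.takeWhile (· ≠ ';') w2 from rfl]
    rw [pv_rstrip_append _ _ (fun c hc => by
      rcases List.mem_singleton.mp hc with rfl; decide)]
    rfl
  rw [hstrip, pv_splitOnMax1, if_pos (by simp)]
  rw [pv_takeWhile_pass _ _ (fun c hc => by simp [(hprops c hc).2.2])]
  rw [pv_dropWhile_pass _ _ (fun c hc => by simp [(hprops c hc).2.2])]
  rw [List.takeWhile_cons, if_neg (by simp), List.dropWhile_cons, if_neg (by simp)]
  have hdrop : (s.dropWhile PySem.Chars.isspace).drop 11 = w2 := by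
    rw [hu, show (a10 ++ '=' :: w2) = (a10 ++ ['=']) ++ w2 from by simp,
      show (11 : ℕ) = (a10 ++ ['=']).length from by simp [hlen]]
    exact List.drop_left
  rw [hdrop]
  simp [PySem.List.pyGet?, PySem.List.pyIdx?]

theorem pv_sSplit_nil (s : List Char) (h : s.dropWhile (· ≠ ';') = []) :
    pvSSplit s = [s.takeWhile (· ≠ ';')] := by
  induction s with
  | nil => simp [pvSSplit]
  | cons a r ih =>
    by_cases ha : a = ';'
    · subst ha
      simp [List.dropWhile_cons] at h
    · rw [List.dropWhile_cons, if_pos (by simp [ha])] at h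
      simp only [pvSSplit, if_neg ha]
      rw [ih h]
      simp [ha]

theorem pv_sSplit_cons (s : List Char) (c : Char) (b : List Char)
    (h : s.dropWhile (· ≠ ';') = c :: b) :
    pvSSplit s = s.takeWhile (· ≠ ';') :: pvSSplit b := by
  induction s with
  | nil => simp at h
  | cons a r ih =>
    by_cases ha : a = ';'
    · subst ha
      rw [List.dropWhile_cons, if_neg (by simp)] at h
      injection h with h1 h2
      subst h1; subst h2
      simp [pvSSplit, List.takeWhile_cons]
    · rw [List.dropWhile_cons, if_pos (by simp [ha])] at h
      simp only [pvSSplit, if_neg ha]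
      rw [ih h]
      simp [ha]

theorem pv_main (s : List Char) : akLoopA (pvSSplit s) = akScanB s := by
  suffices H : ∀ n (s : List Char), s.length ≤ n → akLoopA (pvSSplit s) = akScanB s from
    H s.length s le_rfl
  intro n
  induction n with
  | zero =>
    intro s hlen
    have : s = [] := by cases s <;> simp_all
    subst this
    rw [akScanB]
    simp only [pvSSplit, akLoopA]
    decide
  | succ m ih =>
    intro s hlen
    rw [akScanB]
    by_cases hpred : PySem.Chars.startswith
        (PySem.Chars.lower (s.dropWhile PySem.Chars.isspace)) "accountkey=".toList = true
    · have hA := (pv_pred_iff s).mpr hpred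
      rw [if_pos hpred]
      cases hdrop : s.dropWhile (· ≠ ';') with
      | nil =>
        rw [pv_sSplit_nil s hdrop]
        simp only [akLoopA, hA, if_true]
        exact pv_val_eq s hpred
      | cons c b =>
        rw [pv_sSplit_cons s c b hdrop]
        simp only [akLoopA, hA, if_true]
        exact pv_val_eq s hpred
    · have hA := (not_congr (pv_pred_iff s)).mpr hpred
      rw [if_neg hpred]
      split
      next heq =>
        rw [pv_sSplit_nil s heq]
        simp only [akLoopA, if_neg hA]
      next c b heq =>
        rw [pv_sSplit_cons s c b heq]
        simp only [akLoopA, if_neg hA]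
        apply ih
        have h1 : (s.dropWhile (· ≠ ';')).length ≤ s.length := List.length_dropWhile_le _ _
        rw [heq] at h1
        simp only [List.length_cons] at h1
        omega

-- ===== VERDICT (by name: the statement is the Claim_ definition above) =====
theorem extract_account_key_py_spec : Claim_equal_extract_account_key_py := by
  intro s _
  unfold Spec_extract_account_key_py
  simp only [extract_account_key_py, extract_account_key_py_alt, pv_splitOn_eq, pv_main]
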